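-- pv_equiv track=rewrite | github.com/Stephen0wen/text_based_poker | poker.py | possible_hands
-- ===== SOURCE A (Python) =====
-- def possible_hands(cards):
--     hands = []
--     working_cards = cards[:]
--     for i in range(0, len(cards)):
--         for j in range(0, len(cards) - 1):
--             working_cards.pop(i)
--             working_cards.pop(j)
--             hands.append(working_cards)
--             working_cards = cards[:]
--     return hands
-- ===== SOURCE B (Python) =====
-- def possible_hands(cards):
--     n = len(cards)
--     return [
--         [c for idx, c in enumerate(cards) if idx != i and idx != k]
--         for i in range(n)
--         for k in range(n)
--         if k != i
--     ]
-- ===== Notes on version B (the rewrite author's own statement) =====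
-- stated objective: idiomatic
-- what changed: B generates the ordered pairs of distinct indices (i, k) directly and builds each hand by filtering those two positions out of the original list in one comprehension, instead of A's mutate-two-pops-then-reset-a-working-copy strategy.
import Mathlib
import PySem

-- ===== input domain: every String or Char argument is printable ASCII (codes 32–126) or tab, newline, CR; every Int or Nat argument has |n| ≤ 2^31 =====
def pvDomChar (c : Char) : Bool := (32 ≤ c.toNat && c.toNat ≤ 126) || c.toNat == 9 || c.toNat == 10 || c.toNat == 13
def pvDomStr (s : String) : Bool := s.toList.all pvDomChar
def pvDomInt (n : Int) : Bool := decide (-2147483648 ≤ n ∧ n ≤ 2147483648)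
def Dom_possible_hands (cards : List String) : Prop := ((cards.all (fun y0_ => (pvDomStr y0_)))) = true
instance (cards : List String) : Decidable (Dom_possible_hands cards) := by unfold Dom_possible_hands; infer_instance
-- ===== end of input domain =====

-- B replaces A's mutate-pop-and-reset loops by generating the ordered index pairs and
-- filtering each hand directly from the original list (objective: idiomatic).

-- ===== PORT A =====
-- literal transliteration: hands accumulator, working copy popped twice, reset each iteration
def possible_hands (cards : List String) : List (List String) :=
  (PySem.List.pyRange 0 (cards.length : Int)).foldl (fun hands i =>
    (PySem.List.pyRange 0 ((cards.length : Int) - 1)).foldl (fun hands j =>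
      match PySem.List.pop? cards i with
      | none => hands
      | some (_, w1) =>
        match PySem.List.pop? w1 j with
        | none => hands
        | some (_, w2) => hands ++ [w2]) hands) []

-- ===== PORT B =====
-- literal transliteration of Source B's comprehension over index pairs (i, k), k ≠ i
def possible_hands_alt (cards : List String) : List (List String) :=
  (PySem.List.pyRange 0 (cards.length : Int)).flatMap (fun i =>
    ((PySem.List.pyRange 0 (cards.length : Int)).filter (fun k => k != i)).map (fun k =>
      ((PySem.List.enumerate cards).filter (fun p => p.1 != i && p.1 != k)).map (fun p => p.2)))

-- ===== PRECONDITION & SPEC =====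
def Spec_possible_hands (cards : List String) (out : List (List String)) : Prop := out = possible_hands_alt cards
instance (cards : List String) (out : List (List String)) : Decidable (Spec_possible_hands cards out) := by unfold Spec_possible_hands; infer_instance

-- ===== CLAIM (what is proved, stated in full; the proofs are below) =====
def Claim_equal_possible_hands : Prop := ∀ (cards : List String), Dom_possible_hands cards → Spec_possible_hands cards (possible_hands cards)

-- ===== LEMMAS AND PROOFS =====

-- keep the elements of xs whose position (counted from s) satisfies P
def idxFilter {α : Type} (P : Int → Bool) : List α → Int → List α
  | [], _ => []
  | x :: xs, s => (if P s then [x] else []) ++ idxFilter P xs (s + 1)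

theorem enum_filter_eq_idxFilter {α : Type} (P : Int → Bool) :
    ∀ (xs : List α) (s : Int),
      ((PySem.List.enumerate xs s).filter (fun p => P p.1)).map (fun p => p.2)
        = idxFilter P xs s := by
  intro xs
  induction xs with
  | nil => intro s; simp [PySem.List.enumerate, idxFilter]
  | cons x xs ih =>
    intro s
    rw [PySem.List.enumerate_cons]
    by_cases h : P s <;> simp [idxFilter, h, ih]

theorem idxFilter_true {α : Type} (P : Int → Bool) :
    ∀ (xs : List α) (s : Int), (∀ t, s ≤ t → P t = true) → idxFilter P xs s = xs := by
  intro xs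
  induction xs with
  | nil => intro s _; rfl
  | cons x xs ih =>
    intro s h
    simp [idxFilter, h s le_rfl, ih (s + 1) (fun t ht => h t (by omega))]

theorem idxFilter_congr {α : Type} (P Q : Int → Bool) :
    ∀ (xs : List α) (s : Int), (∀ t, s ≤ t → P t = Q t) → idxFilter P xs s = idxFilter Q xs s := by
  intro xs
  induction xs with
  | nil => intro s _; rfl
  | cons x xs ih =>
    intro s h
    simp only [idxFilter, h s le_rfl, ih (s + 1) (fun t ht => h t (by omega))]

theorem idxFilter_single {α : Type} :
    ∀ (xs : List α) (m : Nat) (s : Int),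
      idxFilter (fun t => t != s + (m : Int)) xs s = xs.eraseIdx m := by
  intro xs
  induction xs with
  | nil => intro m s; rfl
  | cons x xs ih =>
    intro m s
    cases m with
    | zero =>
      simp only [idxFilter, List.eraseIdx]
      rw [if_neg (by simp), idxFilter_true]
      · simp
      · intro t ht; simp; omega
    | succ m' =>
      simp only [idxFilter, List.eraseIdx]
      rw [if_pos (by simp; omega)]
      have := ih m' (s + 1)
      rw [idxFilter_congr (fun t => t != s + ((m' + 1 : Nat) : Int))
            (fun t => t != (s + 1) + (m' : Int)) xs (s + 1)
            (by intro t ht; rw [Bool.eq_iff_iff]; simp only [bne_iff_ne, ne_eq]; push_cast; omega)]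
      simp [this]

theorem idxFilter_pair {α : Type} :
    ∀ (xs : List α) (i k : Nat) (s : Int), i ≠ k →
      idxFilter (fun t => t != s + (i : Int) && t != s + (k : Int)) xs s
        = (xs.eraseIdx i).eraseIdx (if k < i then k else k - 1) := by
  intro xs
  induction xs with
  | nil => intro i k s _; simp [idxFilter]
  | cons x xs ih =>
    intro i k s hik
    cases i with
    | zero =>
      cases k with
      | zero => exact absurd rfl hik
      | succ k' =>
        simp only [idxFilter]
        rw [if_neg (by simp)]
        rw [idxFilter_congr (fun t => t != s + ((0 : Nat) : Int) && t != s + ((k' + 1 : Nat) : Int))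
              (fun t => t != (s + 1) + (k' : Int)) xs (s + 1)
              (by intro t ht; rw [Bool.eq_iff_iff]
                  simp only [Bool.and_eq_true, bne_iff_ne, ne_eq]; push_cast; omega)]
        rw [idxFilter_single]
        simp [List.eraseIdx]
    | succ i' =>
      cases k with
      | zero =>
        simp only [idxFilter]
        rw [if_neg (by simp)]
        rw [idxFilter_congr (fun t => t != s + ((i' + 1 : Nat) : Int) && t != s + ((0 : Nat) : Int))
              (fun t => t != (s + 1) + (i' : Int)) xs (s + 1)
              (by intro t ht; rw [Bool.eq_iff_iff]
                  simp only [Bool.and_eq_true, bne_iff_ne, ne_eq]; push_cast; omega)]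
        rw [idxFilter_single]
        simp [List.eraseIdx]
      | succ k' =>
        have hik' : i' ≠ k' := by omega
        simp only [idxFilter]
        rw [if_pos (by simp; omega)]
        rw [idxFilter_congr (fun t => t != s + ((i' + 1 : Nat) : Int) && t != s + ((k' + 1 : Nat) : Int))
              (fun t => t != (s + 1) + (i' : Int) && t != (s + 1) + (k' : Int)) xs (s + 1)
              (by intro t ht; rw [Bool.eq_iff_iff]
                  simp only [Bool.and_eq_true, bne_iff_ne, ne_eq]; push_cast; omega)]
        rw [ih i' k' (s + 1) hik']
        by_cases hlt : k' < i'
        · rw [if_pos hlt, if_pos (by omega)]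
          simp [List.eraseIdx]
        · rw [if_neg hlt, if_neg (by omega)]
          have hk1 : 1 ≤ k' + 1 - 1 + 1 := by omega
          simp only [List.eraseIdx, Nat.add_sub_cancel]
          have : k' ≥ 1 ∨ k' = 0 := by omega
          rcases this with h1 | h0
          · have : k' = (k' - 1) + 1 := by omega
            rw [this]
            simp [List.eraseIdx]
          · omega

-- B's hand written as a double eraseIdx
theorem handB_eq (xs : List String) (i k : Int) (hi : 0 ≤ i) (hk : 0 ≤ k) (hik : i ≠ k) :
    ((PySem.List.enumerate xs).filter (fun p => p.1 != i && p.1 != k)).map (fun p => p.2)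
      = (xs.eraseIdx i.toNat).eraseIdx (if k < i then k.toNat else k.toNat - 1) := by
  rw [enum_filter_eq_idxFilter (fun t => t != i && t != k) xs 0]
  have h1 : (fun t => t != i && t != k)
      = (fun t => t != (0 : Int) + (i.toNat : Int) && t != (0 : Int) + (k.toNat : Int)) := by
    funext t
    have : (0 : Int) + (i.toNat : Int) = i := by omega
    have : (0 : Int) + (k.toNat : Int) = k := by omega
    congr 2 <;> omega
  rw [h1, idxFilter_pair xs i.toNat k.toNat 0 (by omega)]
  congr 1
  by_cases h : k < i
  · rw [if_pos h, if_pos (by omega)]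
  · rw [if_neg h, if_neg (by omega)]

-- the per-i equality of the inner lists
theorem perI (cards : List String) (i : Int) (h0 : 0 ≤ i) (hn : i < (cards.length : Int)) :
    (PySem.List.pyRange 0 ((cards.length : Int) - 1)).map
        (fun j => (cards.eraseIdx i.toNat).eraseIdx j.toNat)
      = ((PySem.List.pyRange 0 (cards.length : Int)).filter (fun k => k != i)).map
          (fun k => ((PySem.List.enumerate cards).filter (fun p => p.1 != i && p.1 != k)).map (fun p => p.2)) := by
  have hfilter : (PySem.List.pyRange 0 (cards.length : Int)).filter (fun k => k != i)
      = PySem.List.pyRange 0 i ++ PySem.List.pyRange (i + 1) (cards.length : Int) := by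
    rw [PySem.List.pyRange_one_append 0 i (cards.length : Int) h0 hn.le,
        PySem.List.pyRange_one_append i (i + 1) (cards.length : Int) (by omega) (by omega),
        PySem.List.pyRange_one_singleton]
    have f1 : (PySem.List.pyRange 0 i).filter (fun k => k != i) = PySem.List.pyRange 0 i :=
      List.filter_eq_self.mpr (by
        intro a ha; rw [PySem.List.mem_pyRange_one] at ha; simp only [bne_iff_ne, ne_eq]; omega)
    have f2 : ([i]).filter (fun k => k != i) = [] := by simp
    have f3 : (PySem.List.pyRange (i + 1) (cards.length : Int)).filter (fun k => k != i)
        = PySem.List.pyRange (i + 1) (cards.length : Int) :=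
      List.filter_eq_self.mpr (by
        intro a ha; rw [PySem.List.mem_pyRange_one] at ha; simp only [bne_iff_ne, ne_eq]; omega)
    rw [List.filter_append, List.filter_append, f1, f2, f3]
    simp
  rw [hfilter, List.map_append]
  rw [PySem.List.pyRange_one_append 0 i ((cards.length : Int) - 1) h0 (by omega), List.map_append]
  congr 1
  · apply List.map_congr_left
    intro j hj
    rw [PySem.List.mem_pyRange_one] at hj
    rw [handB_eq cards i j h0 hj.1 (by omega), if_pos hj.2]
  · rw [PySem.List.pyRange_one i ((cards.length : Int) - 1),
        PySem.List.pyRange_one (i + 1) (cards.length : Int), List.map_map, List.map_map]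
    have hlen : ((cards.length : Int) - 1 - i).toNat = ((cards.length : Int) - (i + 1)).toNat := by omega
    rw [hlen]
    apply List.map_congr_left
    intro m _
    simp only [Function.comp]
    rw [handB_eq cards i (i + 1 + (m : Int)) h0 (by omega) (by omega), if_neg (by omega)]
    congr 1
    omega

theorem ph_eq (cards : List String) : possible_hands cards = possible_hands_alt cards := by
  unfold possible_hands possible_hands_alt
  rw [PySem.List.foldl_congr_mem (PySem.List.pyRange 0 (cards.length : Int)) _
        (fun hands i => hands ++ (PySem.List.pyRange 0 ((cards.length : Int) - 1)).map
          (fun j => (cards.eraseIdx i.toNat).eraseIdx j.toNat)) []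
        (by
          intro acc i hi
          rw [PySem.List.mem_pyRange_one] at hi
          have hi' : i = ((i.toNat : Nat) : Int) := by omega
          have hilen : i.toNat < cards.length := by omega
          rw [PySem.List.foldl_congr_mem _ _
                (fun hands j => hands ++ [(cards.eraseIdx i.toNat).eraseIdx j.toNat]) acc
                (by
                  intro acc' j hj
                  rw [PySem.List.mem_pyRange_one] at hj
                  have hj' : j = ((j.toNat : Nat) : Int) := by omega
                  have hjlen : j.toNat < (cards.eraseIdx i.toNat).length := by
                    rw [List.length_eraseIdx_of_lt hilen]; omega
                  rw [hi', hj']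
                  simp only [PySem.List.pop?_natCast cards i.toNat hilen,
                    PySem.List.pop?_natCast (cards.eraseIdx i.toNat) j.toNat hjlen,
                    Int.toNat_natCast])]
          rw [PySem.List.foldl_append_singleton_eq_map])]
  rw [PySem.List.foldl_append_eq_flatMap]
  rw [List.nil_append]
  apply List.flatMap_congr
  intro i hi
  rw [PySem.List.mem_pyRange_one] at hi
  exact perI cards i hi.1 hi.2

-- ===== VERDICT (by name: the statement is the Claim_ definition above) =====
theorem possible_hands_spec : Claim_equal_possible_hands := by
  intro cards _
  unfold Spec_possible_hands
  exact ph_eq cards
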